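-- pv_equiv track=rewrite | github.com/shorty-kellz/UD-AI-Search | AI_Search_Engine/frontend/search_ui.py | split_by_title_patterns
-- ===== SOURCE A (Python) =====
-- def split_by_title_patterns(text: str) -> list:
--     """Split text by looking for title patterns"""
--     sections = []
--     current_section = []
--
--     lines = text.split('\n')
--     for line in lines:
--         line = line.strip()
--         if not line:
--             continue
--
--         # Check if this line looks like a title (starts with common patterns)
--         if (line.startswith('**') and line.endswith('**') or
--             line.isupper() or
--             line.startswith('Title:') or
--             line.startswith('Fast Fact') or
--             line.startswith('Article') or
--             (len(line) < 100 and not line.startswith('http'))):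
--
--             # Start new section
--             if current_section:
--                 sections.append('\n'.join(current_section))
--             current_section = [line]
--         else:
--             current_section.append(line)
--
--     # Add the last section
--     if current_section:
--         sections.append('\n'.join(current_section))
--
--     return sections
-- ===== SOURCE B (Python) =====
-- def _is_title(line):
--     return (line.startswith('**') and line.endswith('**') or
--             line.isupper() or
--             line.startswith('Title:') or
--             line.startswith('Fast Fact') or
--             line.startswith('Article') or
--             (len(line) < 100 and not line.startswith('http')))
--
--
-- def split_by_title_patterns(text: str) -> list:
--     """Split text by looking for title patterns (chunking re-implementation)."""
--     stripped = [s for s in (l.strip() for l in text.split('\n')) if s]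
--     sections = []
--     i = 0
--     n = len(stripped)
--     while i < n:
--         j = i + 1
--         while j < n and not _is_title(stripped[j]):
--             j += 1
--         sections.append('\n'.join(stripped[i:j]))
--         i = j
--     return sections
-- ===== Notes on version B (the rewrite author's own statement) =====
-- stated objective: simpler
-- what changed: Replaces A's flush-on-title accumulator fold (sections + current_section state) by a pre-pass that builds the stripped non-empty lines and a two-pointer chunking scan: each section is the line at a boundary plus the following run of non-title lines, joined directly.
import Mathlib
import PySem

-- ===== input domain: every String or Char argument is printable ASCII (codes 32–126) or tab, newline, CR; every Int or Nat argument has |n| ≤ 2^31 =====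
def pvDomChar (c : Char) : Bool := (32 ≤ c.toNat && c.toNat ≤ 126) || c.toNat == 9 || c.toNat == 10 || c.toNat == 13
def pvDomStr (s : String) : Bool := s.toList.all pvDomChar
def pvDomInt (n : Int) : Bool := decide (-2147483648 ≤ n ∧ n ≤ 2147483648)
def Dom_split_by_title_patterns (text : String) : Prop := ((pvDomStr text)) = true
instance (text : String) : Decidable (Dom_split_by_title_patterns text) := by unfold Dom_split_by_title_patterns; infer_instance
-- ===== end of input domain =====

-- B replaces A's flush-on-title accumulator fold by a pre-pass (stripped non-empty lines)
-- plus a chunking scan (boundary line + run of non-title lines); objective: simpler.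

-- ===== PORT A =====
-- hand port of Python str.isupper(): at least one cased char and no lowercase char
-- (exact on the printable-ASCII domain, where cased chars are exactly a-z/A-Z)
def pyIsupper (s : String) : Bool :=
  s.toList.any PySem.Chars.isupper && s.toList.all (fun c => !PySem.Chars.islower c)

-- the body of A's `for line in lines:` loop, state = (sections, current_section)
def aStep (acc : List String × List String) (line : String) : List String × List String :=
  let line := PySem.Str.strip line
  if line = "" then acc
  else if (PySem.Str.startswith line "**" && PySem.Str.endswith line "**") ||
          pyIsupper line ||
          PySem.Str.startswith line "Title:" ||
          PySem.Str.startswith line "Fast Fact" ||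
          PySem.Str.startswith line "Article" ||
          (decide (PySem.Str.len line < 100) && !PySem.Str.startswith line "http") then
    if acc.2 = [] then (acc.1, [line])
    else (acc.1 ++ [PySem.Str.join "\n" acc.2], [line])
  else (acc.1, acc.2 ++ [line])

def split_by_title_patterns (text : String) : List String :=
  let lines := (PySem.Str.split? text "\n").getD []   -- sep "\n" ≠ "", so split? is some
  let st := lines.foldl aStep ([], [])
  if st.2 = [] then st.1 else st.1 ++ [PySem.Str.join "\n" st.2]

-- ===== PORT B =====
def bIsTitle (line : String) : Bool :=
  (PySem.Str.startswith line "**" && PySem.Str.endswith line "**") ||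
  pyIsupper line ||
  PySem.Str.startswith line "Title:" ||
  PySem.Str.startswith line "Fast Fact" ||
  PySem.Str.startswith line "Article" ||
  (decide (PySem.Str.len line < 100) && !PySem.Str.startswith line "http")

-- B's outer while loop: each chunk is the boundary line plus the following run of non-titles
def bChunks : List String → List String
  | [] => []
  | x :: rest =>
      PySem.Str.join "\n" (x :: rest.takeWhile (fun l => !bIsTitle l)) ::
      bChunks (rest.dropWhile (fun l => !bIsTitle l))
termination_by ls => ls.length
decreasing_by
  exact Nat.lt_succ_of_le (List.length_dropWhile_le _ _)

def split_by_title_patterns_alt (text : String) : List String :=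
  bChunks ((((PySem.Str.split? text "\n").getD []).map PySem.Str.strip).filter
    (fun s => !(s = "")))

-- ===== PRECONDITION & SPEC =====
def Spec_split_by_title_patterns (text : String) (out : List String) : Prop := out = split_by_title_patterns_alt text
instance (text : String) (out : List String) : Decidable (Spec_split_by_title_patterns text out) := by unfold Spec_split_by_title_patterns; infer_instance

-- ===== CLAIM (what is proved, stated in full; the proofs are below) =====
def Claim_equal_split_by_title_patterns : Prop := ∀ (text : String), Dom_split_by_title_patterns text → Spec_split_by_title_patterns text (split_by_title_patterns text)

-- ===== LEMMAS AND PROOFS =====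

-- A's loop body applied to an already-stripped line
def aStep1 (acc : List String × List String) (line : String) : List String × List String :=
  if line = "" then acc
  else if bIsTitle line then
    if acc.2 = [] then (acc.1, [line])
    else (acc.1 ++ [PySem.Str.join "\n" acc.2], [line])
  else (acc.1, acc.2 ++ [line])

-- the final `if current_section: sections.append(...)` of A
def aFinish (st : List String × List String) : List String :=
  if st.2 = [] then st.1 else st.1 ++ [PySem.Str.join "\n" st.2]

lemma aStep_eq (acc : List String × List String) (l : String) :
    aStep acc l = aStep1 acc (PySem.Str.strip l) := rfl

lemma bChunks_nil : bChunks [] = [] := by simp [bChunks]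

lemma bChunks_cons (x : String) (rest : List String) :
    bChunks (x :: rest) =
      PySem.Str.join "\n" (x :: rest.takeWhile (fun l => !bIsTitle l)) ::
      bChunks (rest.dropWhile (fun l => !bIsTitle l)) := by
  simp [bChunks]

lemma foldl_aStep_eq (ls : List String) (st : List String × List String) :
    ls.foldl aStep st = (ls.map PySem.Str.strip).foldl aStep1 st := by
  induction ls generalizing st with
  | nil => rfl
  | cons x xs ih => simp [List.map, List.foldl, aStep_eq, ih]

lemma foldl_aStep1_filter (ls : List String) (st : List String × List String) :
    ls.foldl aStep1 st = (ls.filter (fun s => !(s = ""))).foldl aStep1 st := by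
  induction ls generalizing st with
  | nil => rfl
  | cons x xs ih =>
      by_cases hx : x = ""
      · simp [hx, List.filter, aStep1, ih]
      · simp [List.filter, hx, List.foldl, ih]

lemma main_chunk (ls : List String) (sections cur : List String)
    (hcur : cur ≠ []) (hne : ∀ l ∈ ls, ¬ l = "") :
    aFinish (ls.foldl aStep1 (sections, cur)) =
      sections ++ (PySem.Str.join "\n" (cur ++ ls.takeWhile (fun l => !bIsTitle l)) ::
        bChunks (ls.dropWhile (fun l => !bIsTitle l))) := by
  induction ls generalizing sections cur with
  | nil =>
      simp [aFinish, hcur, bChunks_nil]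
  | cons x xs ih =>
      have hx : ¬ x = "" := hne x (by simp)
      have hxs : ∀ l ∈ xs, ¬ l = "" := fun l hl => hne l (by simp [hl])
      by_cases ht : bIsTitle x = true
      · have hstep : aStep1 (sections, cur) x
            = (sections ++ [PySem.Str.join "\n" cur], [x]) := by
          simp [aStep1, hx, ht, hcur]
        simp only [List.foldl, hstep]
        rw [ih _ _ (by simp) hxs]
        have htw : List.takeWhile (fun l => !bIsTitle l) (x :: xs) = [] := by
          simp [ht]
        have hdw : List.dropWhile (fun l => !bIsTitle l) (x :: xs) = x :: xs := by
          simp [ht]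
        rw [htw, hdw, bChunks_cons]
        simp
      · have hstep : aStep1 (sections, cur) x = (sections, cur ++ [x]) := by
          simp [aStep1, hx, ht]
        simp only [List.foldl, hstep]
        rw [ih _ _ (by simp [hcur]) hxs]
        have htw : List.takeWhile (fun l => !bIsTitle l) (x :: xs)
            = x :: List.takeWhile (fun l => !bIsTitle l) xs := by
          simp [ht]
        have hdw : List.dropWhile (fun l => !bIsTitle l) (x :: xs)
            = List.dropWhile (fun l => !bIsTitle l) xs := by
          simp [ht]
        rw [htw, hdw]
        simp

-- ===== VERDICT (by name: the statement is the Claim_ definition above) =====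
theorem split_by_title_patterns_spec : Claim_equal_split_by_title_patterns := by
  intro text _
  unfold Spec_split_by_title_patterns
  show aFinish (List.foldl aStep ([], []) ((PySem.Str.split? text "\n").getD [])) =
    bChunks (((((PySem.Str.split? text "\n").getD []).map PySem.Str.strip)).filter
      (fun s => !(s = "")))
  rw [foldl_aStep_eq, foldl_aStep1_filter]
  have hne : ∀ l ∈ ((((PySem.Str.split? text "\n").getD []).map PySem.Str.strip)).filter
      (fun s => !(s = "")), ¬ l = "" := by
    intro l hlmem
    have := List.of_mem_filter hlmem
    simpa using this
  revert hne
  generalize (((((PySem.Str.split? text "\n").getD []).map PySem.Str.strip)).filter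
      (fun s => !(s = ""))) = f
  intro hne
  cases f with
  | nil => simp [aFinish, bChunks_nil]
  | cons x rest =>
      have hx : ¬ x = "" := hne x (by simp)
      have hrest : ∀ l ∈ rest, ¬ l = "" := fun l hl => hne l (by simp [hl])
      have hfirst : aStep1 ([], []) x = ([], [x]) := by
        by_cases ht : bIsTitle x = true <;> simp [aStep1, hx, ht]
      show aFinish (List.foldl aStep1 (aStep1 ([], []) x) rest) = bChunks (x :: rest)
      rw [hfirst, main_chunk rest [] [x] (by simp) hrest, bChunks_cons]
      simp
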